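-- pv_equiv track=rewrite | github.com/Parthi10/hackerrank | algorithm/challenges/easy-gdc.py | is_aws
-- ===== SOURCE A (Python) =====
-- def is_aws(A, l):
-- 	A.append(l)
-- 	for i in range(len(A)):
-- 		flag = True
-- 		if A[i] > 1:
-- 			for j in range(len(A)):
-- 				if (A[j] // A[i]) * A[i] != A[j] :
-- 					flag = False
-- 					break
-- 			if flag:
-- 				return True
-- 	A.remove(l)
-- ===== SOURCE B (Python) =====
-- def _gcd(a, b):
--     a = abs(a)
--     b = abs(b)
--     while b:
--         a, b = b, a % b
--     return a
--
--
-- def is_aws(A, l):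
--     # One gcd pass: an element d > 1 divides every element of A + [l]
--     # iff d equals the gcd of all those elements.
--     # Return value only: A leaves its argument list mutated when it returns True.
--     g = abs(l)
--     for x in A:
--         g = _gcd(g, x)
--     if g > 1 and (g == l or g in A):
--         return True
-- ===== Notes on version B (the rewrite author's own statement) =====
-- stated objective: alternative
-- what changed: replaced the quadratic all-pairs divisibility scan by a single gcd fold over the list: some element d>1 divides everything iff the overall gcd is >1 and is itself in the list
import Mathlib
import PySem

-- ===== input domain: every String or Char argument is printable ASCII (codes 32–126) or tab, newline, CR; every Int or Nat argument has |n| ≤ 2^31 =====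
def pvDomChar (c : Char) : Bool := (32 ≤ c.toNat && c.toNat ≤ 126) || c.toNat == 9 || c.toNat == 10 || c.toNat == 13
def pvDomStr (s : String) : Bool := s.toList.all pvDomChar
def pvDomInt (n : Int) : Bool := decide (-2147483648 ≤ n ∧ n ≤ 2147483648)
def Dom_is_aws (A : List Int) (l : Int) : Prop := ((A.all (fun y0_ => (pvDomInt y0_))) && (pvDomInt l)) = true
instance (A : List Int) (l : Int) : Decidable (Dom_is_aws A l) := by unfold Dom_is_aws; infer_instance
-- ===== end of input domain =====

-- B replaces A's all-pairs divisibility scan by a single gcd fold;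
-- equivalence is about the RETURN value only: A also mutates its argument list in place.

-- ===== PORT A =====
-- inner 'for j' loop: breaks (false) at the first j with (A[j] // A[i]) * A[i] != A[j]
def isAwsInner (ai : Int) : List Int → Bool
  | [] => true
  | aj :: rest =>
    if PySem.Int.floordiv aj ai * ai ≠ aj then false else isAwsInner ai rest

-- outer 'for i' loop over the (already appended) list L; returns True on the first
-- element > 1 that passes the inner loop, else falls off the end (None)
def isAwsOuter (L : List Int) : List Int → Option Bool
  | [] => none
  | ai :: rest =>
    if ai > 1 then
      if isAwsInner ai L then some true else isAwsOuter L rest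
    else isAwsOuter L rest

def is_aws (A : List Int) (l : Int) : Option Bool :=
  isAwsOuter (A ++ [l]) (A ++ [l])

-- ===== PORT B =====
-- _gcd's Euclid while-loop, after both operands are made non-negative (as in Source B)
def gcdLoop (a b : Nat) : Nat :=
  if h : b = 0 then a else gcdLoop b (a % b)
decreasing_by exact Nat.mod_lt _ (Nat.pos_of_ne_zero h)

def pyGcd (a b : Int) : Int := (gcdLoop a.natAbs b.natAbs : Nat)

def is_aws_alt (A : List Int) (l : Int) : Option Bool :=
  let g := A.foldl (fun g x => pyGcd g x) |l|
  if 1 < g ∧ (g = l ∨ g ∈ A) then some true else none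

-- ===== PRECONDITION & SPEC =====
def Spec_is_aws (A : List Int) (l : Int) (out : Option Bool) : Prop := out = is_aws_alt A l
instance (A : List Int) (l : Int) (out : Option Bool) : Decidable (Spec_is_aws A l out) := by unfold Spec_is_aws; infer_instance

-- ===== CLAIM (what is proved, stated in full; the proofs are below) =====
def Claim_equal_is_aws : Prop := ∀ (A : List Int) (l : Int), Dom_is_aws A l → Spec_is_aws A l (is_aws A l)

-- ===== LEMMAS AND PROOFS =====

theorem gcdLoop_eq_gcd (a b : Nat) : gcdLoop a b = Nat.gcd a b := by
  induction b using Nat.strong_induction_on generalizing a with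
  | _ b ih =>
    rw [gcdLoop]
    split
    · simp [*]
    · rename_i h
      rw [ih (a % b) (Nat.mod_lt _ (Nat.pos_of_ne_zero h)) b, Nat.gcd_comm b (a % b),
          ← Nat.gcd_rec b a, Nat.gcd_comm b a]

theorem pyGcd_eq (a b : Int) : pyGcd a b = (Int.gcd a b : Nat) := by
  rw [pyGcd, gcdLoop_eq_gcd]; rfl

theorem inner_iff (ai : Int) (hai : 1 < ai) (L : List Int) :
    isAwsInner ai L = true ↔ ∀ x ∈ L, ai ∣ x := by
  induction L with
  | nil => simp [isAwsInner]
  | cons x rest ih =>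
    have hne : ai ≠ 0 := by omega
    have hdiv : (PySem.Int.floordiv x ai * ai = x) ↔ ai ∣ x := by
      constructor
      · intro h; exact ⟨PySem.Int.floordiv x ai, by rw [Int.mul_comm]; exact h.symm⟩
      · rintro ⟨c, hc⟩
        have hq : PySem.Int.floordiv x ai = c := by
          subst hc
          rw [PySem.Int.floordiv_eq_ediv_of_pos (by omega)]
          exact Int.mul_ediv_cancel_left c hne
        rw [hq, hc]; ring
    simp only [isAwsInner, List.mem_cons]
    by_cases h : PySem.Int.floordiv x ai * ai = x
    · rw [if_neg (not_not_intro h), ih]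
      constructor
      · intro hall y hy
        rcases hy with rfl | hy
        · exact hdiv.mp h
        · exact hall y hy
      · intro hall y hy; exact hall y (Or.inr hy)
    · rw [if_pos h]
      simp only [Bool.false_eq_true, false_iff]
      intro hall
      exact h (hdiv.mpr (hall x (Or.inl rfl)))

theorem outer_iff (L S : List Int) :
    isAwsOuter L S = if ∃ d ∈ S, 1 < d ∧ isAwsInner d L = true then some true else none := by
  induction S with
  | nil => simp [isAwsOuter]
  | cons d rest ih =>
    simp only [isAwsOuter, List.exists_mem_cons_iff]
    by_cases hd : d > 1 <;> by_cases hi : isAwsInner d L = true <;>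
      simp [hd, hi, ih]

theorem dvd_gcdCast (d a b : Int) : d ∣ ((Int.gcd a b : Nat) : Int) ↔ d ∣ a ∧ d ∣ b := by
  constructor
  · intro h
    exact ⟨h.trans (Int.gcd_dvd_left a b), h.trans (Int.gcd_dvd_right a b)⟩
  · rintro ⟨h1, h2⟩
    have hn : d.natAbs ∣ Int.gcd a b :=
      Nat.dvd_gcd (Int.natAbs_dvd_natAbs.mpr h1) (Int.natAbs_dvd_natAbs.mpr h2)
    exact Int.natAbs_dvd.mp (Int.natCast_dvd_natCast.mpr hn)

-- the gcd fold: d divides the fold result iff d divides the start and every element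
theorem fold_dvd (A : List Int) (init : Int) (d : Int) :
    d ∣ A.foldl (fun g x => (Int.gcd g x : Nat)) init ↔ d ∣ init ∧ ∀ x ∈ A, d ∣ x := by
  induction A generalizing init with
  | nil => simp
  | cons x rest ih =>
    simp only [List.foldl_cons, ih, List.mem_cons]
    rw [dvd_gcdCast]
    constructor
    · rintro ⟨⟨h1, h2⟩, hall⟩
      exact ⟨h1, fun y hy => hy.elim (fun h => h ▸ h2) (hall y)⟩
    · rintro ⟨h1, hall⟩
      exact ⟨⟨h1, hall x (Or.inl rfl)⟩, fun y hy => hall y (Or.inr hy)⟩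

theorem fold_nonneg (A : List Int) (init : Int) (h : 0 ≤ init) :
    0 ≤ A.foldl (fun g x => (Int.gcd g x : Nat)) init := by
  induction A generalizing init with
  | nil => simpa
  | cons x rest ih => exact ih _ (Int.natCast_nonneg _)

theorem is_aws_eq (A : List Int) (l : Int) : is_aws A l = is_aws_alt A l := by
  have hfold : A.foldl (fun g x => pyGcd g x) |l|
      = A.foldl (fun g x => (Int.gcd g x : Nat)) |l| := by
    congr 1; funext g x; exact pyGcd_eq g x
  set N := A.foldl (fun g x => (Int.gcd g x : Nat)) |l| with hN
  have hNnn : 0 ≤ N := fold_nonneg A |l| (abs_nonneg l)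
  have hNdvd : N ∣ |l| ∧ ∀ x ∈ A, N ∣ x := (fold_dvd A |l| N).mp dvd_rfl
  rw [is_aws, is_aws_alt, outer_iff, hfold]
  refine if_congr ?_ rfl rfl
  constructor
  · rintro ⟨d, hdL, hd1, hdI⟩
    have hdall : ∀ x ∈ A ++ [l], d ∣ x := (inner_iff d hd1 _).mp hdI
    have hdN : d ∣ N := (fold_dvd A |l| d).mpr
      ⟨(dvd_abs d l).mpr (hdall l (by simp)), fun x hx => hdall x (by simp [hx])⟩
    have hNd : N ∣ d := by
      rcases List.mem_append.mp hdL with h | h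
      · exact hNdvd.2 d h
      · simp at h; rw [h]; exact (dvd_abs N l).mp hNdvd.1
    have : N = d := Int.dvd_antisymm hNnn (by omega) hNd hdN
    subst this
    refine ⟨hd1, ?_⟩
    rcases List.mem_append.mp hdL with h | h
    · exact Or.inr h
    · simp at h; exact Or.inl h
  · rintro ⟨hN1, hNmem⟩
    refine ⟨N, ?_, hN1, (inner_iff N hN1 _).mpr ?_⟩
    · rcases hNmem with h | h
      · simp [h]
      · simp [h]
    · intro x hx
      rcases List.mem_append.mp hx with h | h
      · exact hNdvd.2 x h
      · simp at h; rw [h]; exact (dvd_abs N l).mp hNdvd.1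

-- ===== VERDICT (by name: the statement is the Claim_ definition above) =====
theorem is_aws_spec : Claim_equal_is_aws := by
  intro A l _
  unfold Spec_is_aws
  exact is_aws_eq A l
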